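-- pv_equiv track=rewrite | github.com/destifo/Competitive-Programming | 1335. Minimum Difficulty of a Job Schedule/MinDifficulty.py | minDifficulty2
-- ===== SOURCE A (Python) =====
-- from typing import Dict, List, Tuple
--
-- def minDifficulty2(jobDifficulty: List[int], d: int) -> int:
--     n = len(jobDifficulty)
--     dp = [[float('inf') for _ in range(d+1)] for _ in range(n+1)]
--     dp[n][d] = 0
--
--     for i in range(n-1, -1, -1):
--         for j in range(d):
--             maxx = float('-inf')
--             for k in range(i, n):
--                 maxx = max(maxx, jobDifficulty[k])
--                 dp[i][j] = min(dp[i][j], maxx + dp[k+1][j+1])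
--
--     return dp[0][0] if dp[0][0] != float('inf') else -1
-- ===== SOURCE B (Python) =====
-- from typing import Dict, List, Tuple
--
-- def _omin(a, b):
--     # min where None means "infeasible" (+infinity)
--     if a is None:
--         return b
--     if b is None:
--         return a
--     return a if a < b else b
--
-- def minDifficulty2(jobDifficulty: List[int], d: int) -> int:
--     # O(n*d) monotonic-stack DP: per layer, a stack of (segment max, min
--     # prefix-cost in segment, best-so-far) triples replaces A's O(n^2) inner
--     # running-max scan.
--     n = len(jobDifficulty)
--     if d <= 0 or n < d:
--         return 0 if (d == 0 and n == 0) else -1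
--     pre = [0] + [None] * n        # pre[k] = min cost of first k jobs in 0 days
--     for _ in range(d):
--         new = [None]              # new[k] = min cost of first k jobs, one more day
--         stack = []                # (m, p, best): maximal group of start positions j
--                                   # with common max(jobs[j..i]) == m, p = min pre[j]
--                                   # over the group, best = min over this and all
--                                   # lower groups of p' + m'; maxima strictly
--                                   # decrease towards the top of the stack
--         for i in range(n):
--             x = jobDifficulty[i]
--             p = pre[i]
--             while stack and stack[-1][0] <= x:
--                 _, p2, _ = stack.pop()
--                 p = _omin(p, p2)
--             best = _omin(None if p is None else p + x,
--                          stack[-1][2] if stack else None)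
--             stack.append((x, p, best))
--             new.append(best)
--         pre = new
--     return pre[n] if pre[n] is not None else -1
-- ===== Notes on version B (the rewrite author's own statement) =====
-- stated objective: faster
-- what changed: Replaces A's backward O(n^2*d) table DP (inner running-max scan over every split point) with a forward O(n*d) layered DP whose transition is computed by a monotonic stack of (segment max, min prefix cost, running best) triples, using None instead of float('inf') for infeasible states and answering d==0 / n<d directly.
import Mathlib
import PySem

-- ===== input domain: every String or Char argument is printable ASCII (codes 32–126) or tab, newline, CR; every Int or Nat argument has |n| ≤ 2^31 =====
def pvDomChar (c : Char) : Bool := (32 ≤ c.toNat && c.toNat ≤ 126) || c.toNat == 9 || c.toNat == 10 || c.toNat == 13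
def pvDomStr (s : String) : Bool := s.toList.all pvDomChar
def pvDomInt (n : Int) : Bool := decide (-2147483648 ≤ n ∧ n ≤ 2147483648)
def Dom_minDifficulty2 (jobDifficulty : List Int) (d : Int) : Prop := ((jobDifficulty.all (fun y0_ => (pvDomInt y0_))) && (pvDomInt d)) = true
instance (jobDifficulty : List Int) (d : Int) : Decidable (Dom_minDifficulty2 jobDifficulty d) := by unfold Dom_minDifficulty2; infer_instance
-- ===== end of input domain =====

-- B replaces A's O(n^2*d) backward table DP by a forward layered DP whose
-- transition is computed with a monotonic stack of (segment max, min prefix cost,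
-- running best) triples; equality of return values proved for all d ≥ 0.

-- ===== PORT A =====
-- Extended values of A's float table: ninf = float('-inf'), fin z = an int, inf = float('inf').
inductive PFloat where
  | ninf : PFloat
  | fin : Int → PFloat
  | inf : PFloat
deriving DecidableEq, Repr

-- Python max on the values A's maxx takes (-inf and ints; inf never reaches maxx).
def eMax : PFloat → PFloat → PFloat
  | PFloat.ninf, b => b
  | a, PFloat.ninf => a
  | PFloat.inf, _ => PFloat.inf
  | _, PFloat.inf => PFloat.inf
  | PFloat.fin a, PFloat.fin b => PFloat.fin (max a b)

-- Python min on the values A's dp cells take (ints and inf).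
def eMin : PFloat → PFloat → PFloat
  | PFloat.inf, b => b
  | a, PFloat.inf => a
  | PFloat.ninf, _ => PFloat.ninf
  | _, PFloat.ninf => PFloat.ninf
  | PFloat.fin a, PFloat.fin b => PFloat.fin (min a b)

-- Python + on the values A adds (a finite maxx plus a cell that is an int or inf;
-- ninf + inf never occurs in A, any total completion is faithful).
def eAdd : PFloat → PFloat → PFloat
  | PFloat.fin a, PFloat.fin b => PFloat.fin (a + b)
  | PFloat.inf, _ => PFloat.inf
  | _, PFloat.inf => PFloat.inf
  | _, _ => PFloat.ninf

-- dp[i][j] (in range whenever accessed by A; defaults are never used on d ≥ 0)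
def gcell (dp : List (List PFloat)) (i j : Nat) : PFloat := (dp.getD i []).getD j PFloat.inf

def minDifficulty2 (jobDifficulty : List Int) (d : Int) : Int :=
  let n := jobDifficulty.length
  let dp0 : List (List PFloat) := List.replicate (n+1) (List.replicate (d+1).toNat PFloat.inf)
  let dp1 := dp0.set n ((dp0.getD n []).set d.toNat (PFloat.fin 0))
  let dp2 := (PySem.List.pyRange ((n:Int)-1) (-1) (-1)).foldl (fun dp i =>
      (PySem.List.pyRange 0 d 1).foldl (fun dp j =>
        ((PySem.List.pyRange i (n:Int) 1).foldl
          (fun (st : PFloat × List (List PFloat)) k =>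
            let maxx := eMax st.1 (PFloat.fin (jobDifficulty.getD k.toNat 0))
            let dp := st.2
            let row := dp.getD i.toNat []
            let v := eMin (row.getD j.toNat PFloat.inf)
                          (eAdd maxx (gcell dp (k+1).toNat (j+1).toNat))
            (maxx, dp.set i.toNat (row.set j.toNat v)))
          (PFloat.ninf, dp)).2) dp) dp1
  -- dp[0][0] if dp[0][0] != inf else -1  (a ninf cell never occurs)
  match gcell dp2 0 0 with
  | PFloat.fin z => z
  | _ => -1

-- ===== PORT B =====
-- min where none means "infeasible" (+infinity)   (Source B's _omin)
def omin : Option Int → Option Int → Option Int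
  | none, b => b
  | a, none => a
  | some a, some b => some (min a b)

-- addition, none = infeasible (Source B writes it inline as 'None if p is None else p + x')
def oadd : Option Int → Option Int → Option Int
  | some a, some b => some (a + b)
  | _, _ => none

-- Source B's 'stack[-1][2] if stack else None'; the stack is held top-first here
def bestOf (s : List (Int × Option Int × Option Int)) : Option Int :=
  match s with
  | [] => none
  | (_, _, b) :: _ => b

-- Source B's while loop: pop while the top's max is ≤ x, merging the popped p's
def popMerge : List (Int × Option Int × Option Int) → Int → Option Int →
    List (Int × Option Int × Option Int) × Option Int
  | [], _, p => ([], p)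
  | (m2, p2, b2) :: rest, x, p =>
    if m2 ≤ x then popMerge rest x (omin p p2) else ((m2, p2, b2) :: rest, p)

def minDifficulty2_alt (jobDifficulty : List Int) (d : Int) : Int :=
  let n := jobDifficulty.length
  if d ≤ 0 ∨ (n : Int) < d then (if d = 0 ∧ n = 0 then 0 else -1)
  else
    let pre0 : List (Option Int) := some 0 :: List.replicate n none
    let pre := (PySem.List.pyRange 0 d 1).foldl (fun pre _day =>
      ((PySem.List.pyRange 0 (n : Int) 1).foldl
        (fun (st : List (Int × Option Int × Option Int) × List (Option Int)) i =>
          let x := jobDifficulty.getD i.toNat 0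
          let pm := popMerge st.1 x (pre.getD i.toNat none)
          let best := omin (oadd pm.2 (some x)) (bestOf pm.1)
          ((x, pm.2, best) :: pm.1, st.2 ++ [best]))
        ([], [none])).2) pre0
    match pre.getD n none with
    | some res => res
    | none => -1

-- ===== PRECONDITION & SPEC =====
-- Pre_ excludes exactly d < 0, where Python A raises IndexError (dp rows are empty lists).
def Pre_minDifficulty2 (jobDifficulty : List Int) (d : Int) : Prop := 0 ≤ d
instance (jobDifficulty : List Int) (d : Int) : Decidable (Pre_minDifficulty2 jobDifficulty d) := by unfold Pre_minDifficulty2; infer_instance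
def pvWitness_minDifficulty2 : List Int × Int := ([6, 5, 4, 3, 2, 1], 2)

def Spec_minDifficulty2 (jobDifficulty : List Int) (d : Int) (out : Int) : Prop := out = minDifficulty2_alt jobDifficulty d
instance (jobDifficulty : List Int) (d : Int) (out : Int) : Decidable (Spec_minDifficulty2 jobDifficulty d out) := by unfold Spec_minDifficulty2; infer_instance

-- ===== CLAIM (what is proved, stated in full; the proofs are below) =====
def Claim_equal_minDifficulty2 : Prop := ∀ (jobDifficulty : List Int) (d : Int), Dom_minDifficulty2 jobDifficulty d → Pre_minDifficulty2 jobDifficulty d → Spec_minDifficulty2 jobDifficulty d (minDifficulty2 jobDifficulty d)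

-- ===== LEMMAS AND PROOFS =====

-- ---- the common specification: opt j ys = minimal total difficulty of partitioning
-- ---- ys into exactly j nonempty consecutive blocks (cost of a block = its max); none if impossible.

-- max of a nonempty block
def bmax : List Int → Int
  | [] => 0
  | y :: t => t.foldl max y

-- min over k < n of f k
def ominR (f : Nat → Option Int) (n : Nat) : Option Int :=
  (List.range n).foldl (fun a k => omin a (f k)) none

def opt : Nat → List Int → Option Int
  | 0, ys => if ys = [] then some 0 else none
  | j+1, ys => ominR (fun k => oadd (some (bmax (ys.take (k+1)))) (opt j (ys.drop (k+1)))) ys.length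

theorem omin_none_right (a : Option Int) : omin a none = a := by cases a <;> rfl
theorem omin_assoc (a b c : Option Int) : omin (omin a b) c = omin a (omin b c) := by
  cases a <;> cases b <;> cases c <;> simp [omin, min_assoc]
theorem omin_comm (a b : Option Int) : omin a b = omin b a := by
  cases a <;> cases b <;> simp [omin, min_comm]
theorem oadd_none_right (a : Option Int) : oadd a none = none := by cases a <;> rfl
theorem oadd_assoc (a b c : Option Int) : oadd (oadd a b) c = oadd a (oadd b c) := by
  cases a <;> cases b <;> cases c <;> simp [oadd, add_assoc]
theorem oadd_omin_left (a b c : Option Int) : oadd a (omin b c) = omin (oadd a b) (oadd a c) := by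
  cases a <;> cases b <;> cases c <;> simp [oadd, omin, min_add_add_left]
theorem oadd_omin_right (a b c : Option Int) : oadd (omin a b) c = omin (oadd a c) (oadd b c) := by
  cases a <;> cases b <;> cases c <;> simp [oadd, omin, min_add_add_right]

theorem ominR_zero (f : Nat → Option Int) : ominR f 0 = none := rfl
theorem ominR_succ (f : Nat → Option Int) (n : Nat) :
    ominR f (n+1) = omin (ominR f n) (f n) := by
  simp [ominR, List.range_succ]

theorem ominR_congr {f g : Nat → Option Int} (n : Nat) (h : ∀ k, k < n → f k = g k) :
    ominR f n = ominR g n := by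
  induction n with
  | zero => rfl
  | succ m ih =>
    rw [ominR_succ, ominR_succ, ih (fun k hk => h k (Nat.lt_succ_of_lt hk)), h m (Nat.lt_succ_self m)]

theorem ominR_omin (f g : Nat → Option Int) (n : Nat) :
    ominR (fun k => omin (f k) (g k)) n = omin (ominR f n) (ominR g n) := by
  induction n with
  | zero => rfl
  | succ m ih =>
    rw [ominR_succ, ominR_succ, ominR_succ, ih]
    rw [omin_assoc, omin_assoc]; congr 1
    rw [← omin_assoc, ← omin_assoc, omin_comm (f m)]

theorem oadd_ominR_left (a : Option Int) (f : Nat → Option Int) (n : Nat) :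
    oadd a (ominR f n) = ominR (fun k => oadd a (f k)) n := by
  induction n with
  | zero => simp [ominR_zero, oadd_none_right]
  | succ m ih => rw [ominR_succ, ominR_succ, oadd_omin_left, ih]

theorem oadd_ominR_right (a : Option Int) (f : Nat → Option Int) (n : Nat) :
    oadd (ominR f n) a = ominR (fun k => oadd (f k) a) n := by
  induction n with
  | zero => cases a <;> simp [ominR_zero, oadd]
  | succ m ih => rw [ominR_succ, ominR_succ, oadd_omin_right, ih]

theorem ominR_none (f : Nat → Option Int) (n : Nat) (h : ∀ k, k < n → f k = none) :
    ominR f n = none := by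
  induction n with
  | zero => rfl
  | succ m ih =>
    rw [ominR_succ, ih (fun k hk => h k (Nat.lt_succ_of_lt hk)), h m (Nat.lt_succ_self m)]
    rfl

theorem ominR_single (f : Nat → Option Int) (n k0 : Nat) (hk : k0 < n)
    (h : ∀ k, k < n → k ≠ k0 → f k = none) : ominR f n = f k0 := by
  induction n with
  | zero => omega
  | succ m ih =>
    rw [ominR_succ]
    by_cases hm : k0 = m
    · subst hm
      rw [ominR_none f k0 (fun k hk2 => h k (Nat.lt_succ_of_lt hk2) (Nat.ne_of_lt hk2))]
      cases f k0 <;> rfl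
    · have hk0 : k0 < m := by omega
      rw [ih hk0 (fun k hk2 hne => h k (Nat.lt_succ_of_lt hk2) hne),
          h m (Nat.lt_succ_self m) (fun he => hm he.symm), omin_none_right]

-- triangular double-min swap
theorem ominR_triangle (F : Nat → Nat → Option Int) (n : Nat) :
    ominR (fun a => ominR (fun l => F a (a+1+l)) (n-1-a)) n
      = ominR (fun b => ominR (fun a => F a b) b) n := by
  induction n with
  | zero => rfl
  | succ m ih =>
    rw [ominR_succ, ominR_succ]
    rw [show m+1-1-m = 0 from by omega, ominR_zero, omin_none_right]
    have h1 : ∀ k, k < m →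
        (fun a => ominR (fun l => F a (a+1+l)) (m+1-1-a)) k
          = (fun a => omin (ominR (fun l => F a (a+1+l)) (m-1-a)) (F a m)) k := by
      intro k hk
      simp only
      rw [show m+1-1-k = (m-1-k)+1 from by omega, ominR_succ,
          show k+1+(m-1-k) = m from by omega]
    rw [ominR_congr m h1, ominR_omin, ih]

theorem bmax_singleton (x : Int) : bmax [x] = x := rfl

-- pigeonhole: more days than jobs is infeasible
theorem opt_short (j : Nat) : ∀ ys : List Int, ys.length < j → opt j ys = none := by
  induction j with
  | zero => intro ys h; omega
  | succ m ih =>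
    intro ys h
    rw [opt]
    have : ∀ k, k < ys.length → (fun k => oadd (some (bmax (ys.take (k+1)))) (opt m (ys.drop (k+1)))) k = (fun _ => (none : Option Int)) k := by
      intro k hk
      simp only
      rw [ih (ys.drop (k+1)) (by simp; omega), oadd_none_right]
    rw [ominR_congr ys.length this]
    exact ominR_none _ _ (fun _ _ => rfl)

-- the exchange: opt via the LAST block instead of the first
theorem opt_last (j : Nat) : ∀ ys : List Int,
    opt (j+1) ys = ominR (fun k => oadd (opt j (ys.take k)) (some (bmax (ys.drop k)))) ys.length := by
  induction j with
  | zero =>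
    intro ys
    cases ys with
    | nil => rfl
    | cons y t =>
      set ys := y :: t with hys
      have hn : 0 < ys.length := by simp [hys]
      rw [opt]
      rw [ominR_single _ ys.length (ys.length - 1) (by omega)
            (h := fun k hk hne => by
              rw [show opt 0 (ys.drop (k+1)) = none from by
                    rw [opt]; simp only [ite_eq_right_iff]
                    intro hdrop
                    have := congrArg List.length hdrop
                    simp at this; omega,
                  oadd_none_right])]
      rw [ominR_single _ ys.length 0 (by omega)
            (h := fun k hk hne => by
              rw [show opt 0 (ys.take k) = none from by
                    rw [opt]; simp only [ite_eq_right_iff]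
                    intro htake
                    have := congrArg List.length htake
                    simp at this; omega,
                  show ∀ z, oadd none z = none from fun z => rfl])]
      rw [show ys.length - 1 + 1 = ys.length from by omega, List.take_length,
          show opt 0 (ys.drop ys.length) = some 0 from by rw [opt]; simp,
          show opt 0 (ys.take 0) = some 0 from by rw [opt]; simp,
          List.drop_zero]
      simp [oadd]
  | succ j ih =>
    intro ys
    set n := ys.length with hn
    have key := ominR_triangle (fun a b =>
      oadd (oadd (some (bmax (ys.take (a+1)))) (opt j ((ys.take b).drop (a+1))))
           (some (bmax (ys.drop b)))) n
    rw [opt]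
    have hL : ∀ k, k < n →
        (fun a => oadd (some (bmax (ys.take (a+1)))) (opt (j+1) (ys.drop (a+1)))) k
          = (fun a => ominR (fun l =>
               oadd (oadd (some (bmax (ys.take (a+1)))) (opt j ((ys.take (a+1+l)).drop (a+1))))
                    (some (bmax (ys.drop (a+1+l))))) (n-1-a)) k := by
      intro a ha
      beta_reduce
      rw [ih (ys.drop (a+1)), oadd_ominR_left]
      have hlen : (ys.drop (a+1)).length = n-1-a := by simp [hn]; omega
      rw [hlen]
      refine ominR_congr (n-1-a) (fun l hl => ?_)
      beta_reduce
      rw [← oadd_assoc, List.drop_take, show a+1+l-(a+1) = l from by omega,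
          List.drop_drop]
    have hR : ∀ k, k < n →
        (fun b => oadd (opt (j+1) (ys.take b)) (some (bmax (ys.drop b)))) k
          = (fun b => ominR (fun a =>
               oadd (oadd (some (bmax (ys.take (a+1)))) (opt j ((ys.take b).drop (a+1))))
                    (some (bmax (ys.drop b)))) b) k := by
      intro b hb
      beta_reduce
      rw [opt, oadd_ominR_right]
      have hlen : (ys.take b).length = b := by simp; omega
      rw [hlen]
      refine ominR_congr b (fun a ha => ?_)
      beta_reduce
      rw [List.take_take, show min (a+1) b = a+1 from by omega]
    rw [ominR_congr n hL, key, ← ominR_congr n hR]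

-- ---- A computes toE (opt …) ----
def toE : Option Int → PFloat
  | none => PFloat.inf
  | some z => PFloat.fin z

theorem toE_omin (a b : Option Int) : toE (omin a b) = eMin (toE a) (toE b) := by
  cases a <;> cases b <;> rfl

theorem toE_oadd_fin (x : Int) (b : Option Int) :
    eAdd (PFloat.fin x) (toE b) = toE (oadd (some x) b) := by
  cases b <;> rfl

theorem set_map_range {α : Type} (f : Nat → α) (mm i : Nat) (v : α) :
    ((List.range mm).map f).set i v = (List.range mm).map (fun k => if k = i then v else f k) := by
  refine List.ext_getElem (by simp) (fun k hk1 hk2 => ?_)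
  simp only [List.getElem_set, List.getElem_map, List.getElem_range]
  split_ifs with h1 h2 h2 <;> first | rfl | omega

theorem map_range_const {α : Type} (mm : Nat) (c : α) :
    (List.range mm).map (fun _ => c) = List.replicate mm c := by
  refine List.ext_getElem (by simp) (fun k hk1 hk2 => ?_)
  simp

-- the final value of A's cell (r, j): optimum for the suffix from r with dn - j days left
def acell (xs : List Int) (dn r j : Nat) : PFloat := toE (opt (dn - j) (xs.drop r))

-- A's table after all rows ≥ a have been processed
def aTab (xs : List Int) (dn a : Nat) : List (List PFloat) :=
  (List.range (xs.length+1)).map (fun r =>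
    if r < a then List.replicate (dn+1) PFloat.inf
    else (List.range (dn+1)).map (acell xs dn r))

-- row a while column j is the next to be filled
def midRow (xs : List Int) (dn a j jj : Nat) : PFloat :=
  if jj < j then acell xs dn a jj else PFloat.inf

-- partial min of cell (a, j) after the k loop has run up to (but excluding) m
def wcell (xs : List Int) (dn a j m : Nat) : PFloat :=
  toE (ominR (fun t => oadd (some (bmax ((xs.drop a).take (t+1))))
                            (opt (dn-(j+1)) (xs.drop (a+1+t)))) (m-a))

-- the whole table in the middle of the k loop
def midTabW (xs : List Int) (dn a j m : Nat) : List (List PFloat) :=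
  (List.range (xs.length+1)).map (fun r =>
    if r < a then List.replicate (dn+1) PFloat.inf
    else if r = a then
      (List.range (dn+1)).map (fun jj => if jj = j then wcell xs dn a j m else midRow xs dn a j jj)
    else (List.range (dn+1)).map (acell xs dn r))

theorem bmax_append_singleton (l : List Int) (x : Int) (h : l ≠ []) :
    bmax (l ++ [x]) = max (bmax l) x := by
  cases l with
  | nil => simp at h
  | cons y t => simp [bmax, List.foldl_append]

theorem drop_take_one (xs : List Int) (a : Nat) (ha : a < xs.length) :
    (xs.drop a).take 1 = [xs.getD a 0] := by
  rw [List.drop_eq_getElem_cons ha, List.getD_eq_getElem xs 0 ha]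
  rfl

theorem bmax_take_succ (xs : List Int) (a c : Nat) (h : a + c < xs.length) (hc : 0 < c) :
    bmax ((xs.drop a).take (c+1)) = max (bmax ((xs.drop a).take c)) (xs.getD (a+c) 0) := by
  have hcl : c < (xs.drop a).length := by simp; omega
  rw [← List.take_concat_get' (xs.drop a) c hcl,
      bmax_append_singleton _ _ (by
        intro hnil
        have := congrArg List.length hnil
        simp at this; omega)]
  congr 1
  rw [List.getElem_drop, List.getD_eq_getElem xs 0 (by omega)]

-- start of the k loop: nothing accumulated yet
theorem midTabW_start (xs : List Int) (dn a j : Nat) :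
    midTabW xs dn a j a
      = (List.range (xs.length+1)).map (fun r =>
          if r < a then List.replicate (dn+1) PFloat.inf
          else if r = a then (List.range (dn+1)).map (midRow xs dn a j)
          else (List.range (dn+1)).map (acell xs dn r)) := by
  simp only [midTabW]
  refine List.map_congr_left (fun r hr => ?_)
  split_ifs with h1 h2 <;> try rfl
  refine List.map_congr_left (fun jj hjj => ?_)
  by_cases hjje : jj = j
  · subst hjje
    simp [wcell, midRow, ominR_zero, toE]
  · rw [if_neg hjje]

-- one step of the k loop
theorem kstep (xs : List Int) (dn a j : Nat) (ha : a < xs.length) (hj : j < dn) :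
    ∀ (c m : Nat), m = a + c → m ≤ xs.length →
    ((PySem.List.pyRange ((a:Nat):Int) ((m:Nat):Int) 1).foldl
      (fun (st : PFloat × List (List PFloat)) k =>
        let maxx := eMax st.1 (PFloat.fin (xs.getD k.toNat 0))
        let dp := st.2
        let row := dp.getD ((a:Nat):Int).toNat []
        let v := eMin (row.getD ((j:Nat):Int).toNat PFloat.inf)
                      (eAdd maxx (gcell dp (k+1).toNat (((j:Nat):Int)+1).toNat))
        (maxx, dp.set ((a:Nat):Int).toNat (row.set ((j:Nat):Int).toNat v)))
      (PFloat.ninf, midTabW xs dn a j a))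
    = ((if a < m then PFloat.fin (bmax ((xs.drop a).take (m-a))) else PFloat.ninf),
       midTabW xs dn a j m) := by
  intro c
  induction c with
  | zero =>
    intro m hm _
    obtain rfl : m = a := by omega
    rw [PySem.List.pyRange_one_eq_nil (le_refl _), List.foldl_nil, if_neg (lt_irrefl _)]
  | succ c ih =>
    intro m hm hmn
    have hm' : m = (a + c) + 1 := by omega
    subst hm'
    rw [show (((a+c+1:Nat)):Int) = (((a+c:Nat)):Int) + 1 from by push_cast; ring,
        PySem.List.pyRange_one_succ_right (by push_cast; omega),
        List.foldl_append, ih (a+c) rfl (by omega), List.foldl_cons, List.foldl_nil]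
    have hacl : a + c < xs.length := by omega
    -- the running max after this step
    have hmaxx : eMax (if a < a + c then PFloat.fin (bmax ((xs.drop a).take (a+c-a))) else PFloat.ninf)
        (PFloat.fin (xs.getD (((a+c:Nat)):Int).toNat 0))
        = PFloat.fin (bmax ((xs.drop a).take (a+c+1-a))) := by
      rw [show ((((a+c:Nat)):Int)).toNat = a + c from by omega]
      by_cases hc0 : 0 < c
      · rw [if_pos (by omega), show a+c-a = c from by omega, show a+c+1-a = c+1 from by omega]
        rw [bmax_take_succ xs a c hacl hc0]
        rfl
      · obtain rfl : c = 0 := by omega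
        rw [if_neg (by omega), show a+0+1-a = 1 from by omega, Nat.add_zero,
            drop_take_one xs a (by omega), bmax_singleton]
        rfl
    rw [hmaxx]
    dsimp only
    -- reading row a of the table
    rw [show ((((a:Nat)):Int)).toNat = a from by omega,
        show ((((j:Nat)):Int)).toNat = j from by omega,
        show ((((a+c:Nat)):Int) + 1).toNat = a+c+1 from by omega,
        show ((((j:Nat)):Int) + 1).toNat = j+1 from by omega]
    rw [show (midTabW xs dn a j (a+c)).getD a []
          = (List.range (dn+1)).map (fun jj => if jj = j then wcell xs dn a j (a+c) else midRow xs dn a j jj) from by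
        simp only [midTabW]
        rw [PySem.List.getD_map_range _ _ a _ (by omega), if_neg (lt_irrefl a), if_pos rfl]]
    rw [PySem.List.getD_map_range _ _ j _ (by omega), if_pos rfl]
    rw [show gcell (midTabW xs dn a j (a+c)) (a+c+1) (j+1) = acell xs dn (a+c+1) (j+1) from by
        simp only [gcell, midTabW]
        rw [PySem.List.getD_map_range _ _ (a+c+1) _ (by omega),
            if_neg (by omega), if_neg (by omega),
            PySem.List.getD_map_range _ _ (j+1) _ (by omega)]]
    -- the new partial minimum is wcell (a+c+1)
    have hv : eMin (wcell xs dn a j (a+c))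
        (eAdd (PFloat.fin (bmax ((xs.drop a).take (a+c+1-a)))) (acell xs dn (a+c+1) (j+1)))
        = wcell xs dn a j (a+c+1) := by
      simp only [acell, wcell]
      rw [toE_oadd_fin, ← toE_omin,
          show a+c+1-a = (a+c-a)+1 from by omega, ominR_succ,
          show a+1+(a+c-a) = a+c+1 from by omega]
    rw [hv]
    -- writing the cell back
    simp only [midTabW]
    rw [set_map_range, set_map_range, if_pos (show a < a+c+1 from by omega), Prod.mk.injEq]
    refine ⟨rfl, ?_⟩
    refine List.map_congr_left (fun r hr => ?_)
    by_cases hra : r = a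
    · subst hra
      rw [if_pos rfl, if_neg (lt_irrefl r), if_pos rfl]
      refine List.map_congr_left (fun jj hjj => ?_)
      by_cases hjje : jj = j
      · subst hjje
        rw [if_pos rfl, if_pos rfl]
      · rw [if_neg hjje, if_neg hjje, if_neg hjje]
    · by_cases hlt : r < a
      · rw [if_neg hra, if_pos hlt, if_pos hlt]
      · rw [if_neg hra, if_neg hlt, if_neg hlt, if_neg hra, if_neg hra]

-- the k loop fills cell (a, j) with its final value
theorem midTabW_end (xs : List Int) (dn a j : Nat) (ha : a < xs.length) (hj : j < dn) :
    midTabW xs dn a j xs.length = midTabW xs dn a (j+1) a := by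
  have hW : wcell xs dn a j xs.length = acell xs dn a j := by
    simp only [wcell, acell]
    rw [show dn - j = (dn - (j+1)) + 1 from by omega, opt]
    congr 1
    rw [show (xs.drop a).length = xs.length - a from by simp]
    refine (ominR_congr _ (fun t ht => ?_)).symm
    rw [List.drop_drop, show a+(t+1) = a+1+t from by omega]
  simp only [midTabW]
  refine List.map_congr_left (fun r hr => ?_)
  split_ifs with h1 h2 <;> try rfl
  refine List.map_congr_left (fun jj hjj => ?_)
  simp only [midRow]
  by_cases e1 : jj = j
  · subst e1
    rw [if_pos rfl, if_neg (by omega), if_pos (by omega), hW]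
  · rw [if_neg e1]
    by_cases e2 : jj = j+1
    · subst e2
      rw [if_neg (show ¬ (j+1 < j) from by omega), if_pos rfl]
      simp [wcell, ominR_zero, toE]
    · rw [if_neg e2]
      by_cases e3 : jj < j
      · rw [if_pos e3, if_pos (by omega)]
      · rw [if_neg e3, if_neg (by omega)]

-- the j loop processes the columns of row a left to right
theorem arow (xs : List Int) (dn a : Nat) (ha : a < xs.length) :
    ∀ (jc j : Nat), j + jc = dn →
    ((PySem.List.pyRange ((j:Nat):Int) ((dn:Nat):Int) 1).foldl
      (fun dp jv =>
        ((PySem.List.pyRange ((a:Nat):Int) ((xs.length:Nat):Int) 1).foldl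
          (fun (st : PFloat × List (List PFloat)) k =>
            let maxx := eMax st.1 (PFloat.fin (xs.getD k.toNat 0))
            let dp := st.2
            let row := dp.getD ((a:Nat):Int).toNat []
            let v := eMin (row.getD jv.toNat PFloat.inf)
                          (eAdd maxx (gcell dp (k+1).toNat (jv+1).toNat))
            (maxx, dp.set ((a:Nat):Int).toNat (row.set jv.toNat v)))
          (PFloat.ninf, dp)).2)
      (midTabW xs dn a j a))
    = midTabW xs dn a dn a := by
  intro jc
  induction jc with
  | zero =>
    intro j hj
    obtain rfl : j = dn := by omega
    rw [PySem.List.pyRange_one_eq_nil (le_refl _), List.foldl_nil]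
  | succ jc ih =>
    intro j hj
    rw [PySem.List.pyRange_one_cons (a := ((j:Nat):Int)) (b := ((dn:Nat):Int)) (by omega),
        List.foldl_cons]
    rw [kstep xs dn a j ha (by omega) (xs.length - a) xs.length (by omega) (by omega)]
    dsimp only
    rw [midTabW_end xs dn a j ha (by omega),
        show ((j:Nat):Int) + 1 = (((j+1:Nat)):Int) from by push_cast; ring]
    exact ih (j+1) (by omega)

-- relating consecutive values of aTab to the row sweep
theorem aTab_succ_eq_mid (xs : List Int) (dn a : Nat) :
    aTab xs dn (a+1) = midTabW xs dn a 0 a := by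
  rw [midTabW_start]
  simp only [aTab]
  refine List.map_congr_left (fun r hr => ?_)
  by_cases h1 : r < a
  · rw [if_pos (by omega), if_pos h1]
  · by_cases h2 : r = a
    · subst h2
      rw [if_pos (by omega), if_neg (lt_irrefl r), if_pos rfl]
      rw [show (List.range (dn+1)).map (midRow xs dn r 0) = (List.range (dn+1)).map (fun _ => PFloat.inf) from
            List.map_congr_left (fun jj _ => by simp only [midRow]; rw [if_neg (by omega)]),
          map_range_const]
    · rw [if_neg (by omega), if_neg (by omega), if_neg h2]

theorem mid_eq_aTab (xs : List Int) (dn a : Nat) (ha : a < xs.length) :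
    midTabW xs dn a dn a = aTab xs dn a := by
  simp only [aTab, midTabW]
  refine List.map_congr_left (fun r hr => ?_)
  split_ifs with h1 h2 <;> try rfl
  subst h2
  refine List.map_congr_left (fun jj hjj => ?_)
  have hjd : jj ≤ dn := by
    have := List.mem_range.mp hjj
    omega
  by_cases e1 : jj = dn
  · subst e1
    simp only [wcell, acell]
    rw [if_pos trivial, Nat.sub_self, Nat.sub_self, ominR_zero,
        show opt 0 (xs.drop r) = if xs.drop r = [] then some 0 else none from rfl,
        if_neg (fun hnil => by
          have := congrArg List.length hnil
          simp at this; omega)]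
  · simp only [midRow]
    rw [if_neg e1, if_pos (by omega)]

-- the outer row loop, bottom row upwards
theorem aouter (xs : List Int) (dn : Nat) : ∀ (a : Nat), a ≤ xs.length →
    ((PySem.List.pyRange (((a:Nat):Int) - 1) (-1) (-1)).foldl
      (fun dp i =>
        (PySem.List.pyRange 0 ((dn:Nat):Int) 1).foldl
          (fun dp jv =>
            ((PySem.List.pyRange i ((xs.length:Nat):Int) 1).foldl
              (fun (st : PFloat × List (List PFloat)) k =>
                let maxx := eMax st.1 (PFloat.fin (xs.getD k.toNat 0))
                let dp := st.2
                let row := dp.getD i.toNat []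
                let v := eMin (row.getD jv.toNat PFloat.inf)
                              (eAdd maxx (gcell dp (k+1).toNat (jv+1).toNat))
                (maxx, dp.set i.toNat (row.set jv.toNat v)))
              (PFloat.ninf, dp)).2)
          dp)
      (aTab xs dn a))
    = aTab xs dn 0 := by
  intro a
  induction a with
  | zero =>
    intro _
    rw [show (((0:Nat)):Int) - 1 = -1 from by norm_num,
        PySem.List.pyRange_neg_one_eq_nil (by omega), List.foldl_nil]
  | succ a ih =>
    intro ha
    rw [show ((((a+1:Nat)):Int)) - 1 = ((a:Nat):Int) from by push_cast; ring,
        PySem.List.pyRange_neg_one_cons (by omega), List.foldl_cons]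
    rw [aTab_succ_eq_mid xs dn a]
    rw [show (PySem.List.pyRange 0 ((dn:Nat):Int) 1)
          = PySem.List.pyRange (((0:Nat)):Int) ((dn:Nat):Int) 1 from rfl]
    rw [arow xs dn a (by omega) dn 0 (by omega), mid_eq_aTab xs dn a (by omega)]
    exact ih (by omega)

theorem aTab_init (xs : List Int) (dn : Nat) :
    (List.replicate (xs.length+1) (List.replicate (dn+1) PFloat.inf)).set xs.length
      (((List.replicate (xs.length+1) (List.replicate (dn+1) PFloat.inf)).getD xs.length []).set dn (PFloat.fin 0))
    = aTab xs dn xs.length := by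
  rw [← map_range_const (xs.length+1) (List.replicate (dn+1) PFloat.inf),
      PySem.List.getD_map_range _ _ xs.length _ (by omega),
      ← map_range_const (dn+1) PFloat.inf, set_map_range, set_map_range]
  simp only [aTab]
  refine List.map_congr_left (fun r hr => ?_)
  by_cases h1 : r = xs.length
  · subst h1
    rw [if_pos rfl, if_neg (lt_irrefl _)]
    refine List.map_congr_left (fun jj hjj => ?_)
    have hjd : jj ≤ dn := by
      have := List.mem_range.mp hjj
      omega
    by_cases e1 : jj = dn
    · subst e1
      simp only [acell]
      rw [if_pos trivial, Nat.sub_self, List.drop_length,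
          show opt 0 ([] : List Int) = some 0 from rfl]
      rfl
    · simp only [acell]
      rw [if_neg e1, List.drop_length,
          show dn - jj = (dn - jj - 1) + 1 from by omega, opt]
      rfl
  · rw [if_neg h1, if_pos (by
      have := List.mem_range.mp hr
      omega), map_range_const]

theorem minDifficulty2_eq_opt (xs : List Int) (d : Int) (hd : 0 ≤ d) :
    minDifficulty2 xs d = (match opt d.toNat xs with
                           | some z => z
                           | none => -1) := by
  obtain ⟨dn, rfl⟩ : ∃ dn : Nat, d = (dn : Int) := ⟨d.toNat, by omega⟩
  rw [Int.toNat_natCast]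
  simp only [minDifficulty2]
  rw [show (((dn:Nat):Int) + 1).toNat = dn + 1 from by omega,
      show (((dn:Nat):Int)).toNat = dn from by omega,
      aTab_init xs dn]
  rw [aouter xs dn xs.length (by omega)]
  rw [show gcell (aTab xs dn 0) 0 0 = acell xs dn 0 0 from by
      simp only [gcell, aTab]
      rw [PySem.List.getD_map_range _ _ 0 _ (by omega), if_neg (by omega),
          PySem.List.getD_map_range _ _ 0 _ (by omega)]]
  simp only [acell]
  rw [Nat.sub_zero, List.drop_zero]
  cases opt dn xs <;> rfl

-- ---- B computes opt …: the monotonic-stack invariant ----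

-- min of pre over the index segment [lo, hi)
def ominSeg (f : Nat → Option Int) (lo hi : Nat) : Option Int :=
  ominR (fun t => f (lo + t)) (hi - lo)

theorem ominSeg_self (f : Nat → Option Int) (hi : Nat) : ominSeg f hi hi = none := by
  simp [ominSeg, ominR_zero]

theorem ominSeg_succ (f : Nat → Option Int) (lo hi : Nat) (h : lo ≤ hi) :
    ominSeg f lo (hi+1) = omin (ominSeg f lo hi) (f hi) := by
  simp only [ominSeg]
  rw [show hi+1-lo = (hi-lo)+1 from by omega, ominR_succ, show lo + (hi-lo) = hi from by omega]

theorem ominR_split (f : Nat → Option Int) (lo hi : Nat) (h : lo ≤ hi) :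
    ominR f hi = omin (ominR f lo) (ominSeg f lo hi) := by
  obtain ⟨c, rfl⟩ : ∃ c, hi = lo + c := ⟨hi - lo, by omega⟩
  induction c with
  | zero => rw [Nat.add_zero, ominSeg_self, omin_none_right]
  | succ c ih =>
    rw [show lo + (c+1) = (lo+c)+1 from by omega, ominR_succ, ih (by omega),
        ominSeg_succ f lo (lo+c) (by omega), omin_assoc]

theorem ominSeg_glue (f : Nat → Option Int) (lo2 lo hi : Nat) (h1 : lo2 ≤ lo) (h2 : lo ≤ hi) :
    omin (ominSeg f lo2 lo) (ominSeg f lo hi) = ominSeg f lo2 hi := by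
  obtain ⟨c, rfl⟩ : ∃ c, hi = lo + c := ⟨hi - lo, by omega⟩
  induction c with
  | zero => rw [Nat.add_zero, ominSeg_self, omin_none_right]
  | succ c ih =>
    rw [show lo + (c+1) = (lo+c)+1 from by omega,
        ominSeg_succ f lo (lo+c) (by omega), ← omin_assoc, ih (by omega),
        ominSeg_succ f lo2 (lo+c) (by omega)]

theorem oadd_ominSeg_right (a : Option Int) (f : Nat → Option Int) (lo hi : Nat) :
    oadd (ominSeg f lo hi) a = ominSeg (fun j => oadd (f j) a) lo hi := by
  simp only [ominSeg]
  rw [oadd_ominR_right]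

theorem ominSeg_congr {f g : Nat → Option Int} (lo hi : Nat)
    (h : ∀ j, lo ≤ j → j < hi → f j = g j) : ominSeg f lo hi = ominSeg g lo hi := by
  simp only [ominSeg]
  exact ominR_congr _ (fun t ht => h (lo + t) (by omega) (by omega))

-- The stack invariant: the stack (top first) partitions the start positions [0, hi)
-- into segments of constant block-max, maxima strictly increasing towards the bottom;
-- each entry holds that max, the min of pre over its segment, and the min of
-- (max + min-pre) over its own and all lower segments.
def StkInv (xs : List Int) (pre : Nat → Option Int) (e : Nat) :
    List (Int × Option Int × Option Int) → Nat → Prop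
  | [], hi => hi = 0
  | (m, p, b) :: rest, hi =>
    ∃ lo, lo < hi ∧ StkInv xs pre e rest lo ∧
      (∀ j, lo ≤ j → j < hi → bmax ((xs.take e).drop j) = m) ∧
      p = ominSeg pre lo hi ∧
      b = omin (oadd p (some m)) (bestOf rest) ∧
      (∀ m2 p2 b2 r, rest = (m2, p2, b2) :: r → m < m2)

theorem StkInv_bestOf (xs : List Int) (pre : Nat → Option Int) (e : Nat) :
    ∀ (s : List (Int × Option Int × Option Int)) (hi : Nat), StkInv xs pre e s hi →
      bestOf s = ominR (fun j => oadd (pre j) (some (bmax ((xs.take e).drop j)))) hi := by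
  intro s
  induction s with
  | nil =>
    intro hi h
    obtain rfl : hi = 0 := h
    rfl
  | cons hd rest ih =>
    obtain ⟨m, p, b⟩ := hd
    intro hi h
    obtain ⟨lo, hlo, hrest, hmax, hp, hb, -⟩ := h
    show b = _
    rw [ominR_split _ lo hi (by omega), ← ih lo hrest,
        ominSeg_congr (g := fun j => oadd (pre j) (some m)) lo hi
          (fun j h1 h2 => by rw [hmax j h1 h2]),
        ← oadd_ominSeg_right, ← hp, hb, omin_comm]

theorem popMerge_spec (xs : List Int) (pre : Nat → Option Int) (e : Nat) (x : Int) :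
    ∀ (s : List (Int × Option Int × Option Int)) (hi : Nat) (p0 : Option Int),
      StkInv xs pre e s hi →
      ∃ lo2, lo2 ≤ hi ∧
        (popMerge s x p0).2 = omin p0 (ominSeg pre lo2 hi) ∧
        StkInv xs pre e (popMerge s x p0).1 lo2 ∧
        (∀ m2 p2 b2 r, (popMerge s x p0).1 = (m2, p2, b2) :: r → x < m2) ∧
        (∀ j, lo2 ≤ j → j < hi → bmax ((xs.take e).drop j) ≤ x) := by
  intro s
  induction s with
  | nil =>
    intro hi p0 h
    obtain rfl : hi = 0 := h
    exact ⟨0, le_refl 0, by rw [ominSeg_self, omin_none_right]; rfl, rfl,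
      fun _ _ _ _ h => by simp [popMerge] at h, fun j h1 h2 => by omega⟩
  | cons hd rest ih =>
    obtain ⟨m, p, b⟩ := hd
    intro hi p0 h
    obtain ⟨lo, hlo, hrest, hmax, hp, hb, hord⟩ := h
    by_cases hx : m ≤ x
    · rw [show popMerge ((m, p, b) :: rest) x p0 = popMerge rest x (omin p0 p) from by
          simp [popMerge, hx]]
      obtain ⟨lo2, hlo2, hval, hinv, hhead, hseg⟩ := ih lo (omin p0 p) hrest
      refine ⟨lo2, by omega, ?_, hinv, hhead, ?_⟩
      · rw [hval, hp, omin_assoc, omin_comm (ominSeg pre lo hi),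
            ominSeg_glue pre lo2 lo hi hlo2 (by omega)]
      · intro j h1 h2
        by_cases hj : j < lo
        · exact hseg j h1 hj
        · rw [hmax j (by omega) h2]; exact hx
    · rw [show popMerge ((m, p, b) :: rest) x p0 = ((m, p, b) :: rest, p0) from by
          simp [popMerge, hx]]
      refine ⟨hi, le_refl hi, by rw [ominSeg_self, omin_none_right],
        ⟨lo, hlo, hrest, hmax, hp, hb, hord⟩, ?_, fun j h1 h2 => by omega⟩
      intro m2 p2 b2 r hr
      injection hr with h1 h2
      injection h1 with h3 h4
      omega

theorem drop_take_succ (xs : List Int) (e j : Nat) (hj : j ≤ e) (he : e < xs.length) :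
    (xs.take (e+1)).drop j = ((xs.take e).drop j) ++ [xs.getD e 0] := by
  rw [List.take_add_one, List.getElem?_eq_getElem he]
  rw [List.drop_append_of_le_length (by simp; omega)]
  rw [List.getD_eq_getElem xs 0 he]
  rfl

-- extending the processed prefix by one element smaller than every surviving max
theorem StkInv_extend (xs : List Int) (pre : Nat → Option Int) (e : Nat) (he : e < xs.length) :
    ∀ (s : List (Int × Option Int × Option Int)) (hi : Nat), hi ≤ e →
      StkInv xs pre e s hi →
      (∀ m2 p2 b2 r, s = (m2, p2, b2) :: r → xs.getD e 0 < m2) →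
      StkInv xs pre (e+1) s hi := by
  intro s
  induction s with
  | nil => intro hi _ h _; exact h
  | cons hd rest ih =>
    obtain ⟨m, p, b⟩ := hd
    intro hi hhe h hhead
    obtain ⟨lo, hlo, hrest, hmax, hp, hb, hord⟩ := h
    have hxm : xs.getD e 0 < m := hhead m p b rest rfl
    refine ⟨lo, hlo, ih lo (by omega) hrest
        (fun m2 p2 b2 r hr => lt_trans hxm (hord m2 p2 b2 r hr)), ?_, hp, hb, hord⟩
    intro j h1 h2
    rw [drop_take_succ xs e j (by omega) he,
        bmax_append_singleton _ _ (by
          intro hnil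
          have := congrArg List.length hnil
          simp at this; omega),
        hmax j h1 h2]
    omega

-- pushing the merged entry restores the invariant for the longer prefix
theorem StkInv_step (xs : List Int) (pre : Nat → Option Int) (e : Nat) (he : e < xs.length)
    (s : List (Int × Option Int × Option Int)) (hInv : StkInv xs pre e s e) :
    StkInv xs pre (e+1)
      ((xs.getD e 0, (popMerge s (xs.getD e 0) (pre e)).2,
        omin (oadd (popMerge s (xs.getD e 0) (pre e)).2 (some (xs.getD e 0)))
             (bestOf (popMerge s (xs.getD e 0) (pre e)).1))
        :: (popMerge s (xs.getD e 0) (pre e)).1) (e+1) := by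
  obtain ⟨lo2, hlo2, hval, hinv, hhead, hseg⟩ :=
    popMerge_spec xs pre e (xs.getD e 0) s e (pre e) hInv
  refine ⟨lo2, by omega, StkInv_extend xs pre e he _ lo2 hlo2 hinv hhead, ?_, ?_, rfl, hhead⟩
  · intro j h1 h2
    by_cases hj : j = e
    · subst hj
      rw [drop_take_succ xs j j (le_refl j) he,
          List.drop_eq_nil_of_le (by simp), List.nil_append, bmax_singleton]
    · rw [drop_take_succ xs e j (by omega) he,
          bmax_append_singleton _ _ (by
            intro hnil
            have := congrArg List.length hnil
            simp at this; omega)]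
      have := hseg j h1 (by omega)
      omega
  · rw [hval, omin_comm, ← ominSeg_succ pre lo2 e hlo2]

-- the per-layer inner loop: one day of B, starting from the prefix table preL
theorem binner (xs : List Int) (preL : List (Option Int)) (pre : Nat → Option Int)
    (hpre : ∀ k, k < xs.length → preL.getD k none = pre k) :
    ∀ (c : Nat), c ≤ xs.length →
      ∃ s, ((PySem.List.pyRange 0 ((c:Nat):Int) 1).foldl
        (fun (st : List (Int × Option Int × Option Int) × List (Option Int)) i =>
          let x := xs.getD i.toNat 0
          let pm := popMerge st.1 x (preL.getD i.toNat none)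
          let best := omin (oadd pm.2 (some x)) (bestOf pm.1)
          ((x, pm.2, best) :: pm.1, st.2 ++ [best]))
        ([], [none]))
      = (s, [none] ++ (List.range c).map (fun t =>
          ominR (fun j => oadd (pre j) (some (bmax ((xs.take (t+1)).drop j)))) (t+1)))
      ∧ StkInv xs pre c s c := by
  intro c
  induction c with
  | zero =>
    intro _
    refine ⟨[], ?_, rfl⟩
    rw [show (((0:Nat)):Int) = 0 from rfl, PySem.List.pyRange_one_eq_nil (le_refl _),
        List.foldl_nil]
    simp
  | succ c ih =>
    intro hc
    obtain ⟨s, hfold, hinv⟩ := ih (by omega)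
    have hce : c < xs.length := by omega
    rw [show (((c+1:Nat)):Int) = ((c:Nat):Int) + 1 from by push_cast; ring,
        PySem.List.pyRange_one_succ_right (by omega), List.foldl_append, hfold,
        List.foldl_cons, List.foldl_nil]
    dsimp only
    rw [show (((c:Nat)):Int).toNat = c from by omega, hpre c hce]
    have hstep := StkInv_step xs pre c hce s hinv
    refine ⟨_, ?_, hstep⟩
    have hbest := StkInv_bestOf xs pre (c+1) _ (c+1) hstep
    refine congrArg _ ?_
    rw [List.range_succ, List.map_append, List.map_cons, List.map_nil, ← List.append_assoc]
    congr 1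
    exact congrArg (fun z => [z]) hbest

-- one day of B turns the prefix table for t days into the one for t+1 days
theorem blayer (xs : List Int) (t : Nat) (g : List (Option Int))
    (hg : g = (List.range (xs.length+1)).map (fun k => opt t (xs.take k))) :
    (((PySem.List.pyRange 0 ((xs.length:Int)) 1).foldl
        (fun (st : List (Int × Option Int × Option Int) × List (Option Int)) i =>
          let x := xs.getD i.toNat 0
          let pm := popMerge st.1 x (g.getD i.toNat none)
          let best := omin (oadd pm.2 (some x)) (bestOf pm.1)
          ((x, pm.2, best) :: pm.1, st.2 ++ [best]))
        ([], [none])).2)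
    = (List.range (xs.length+1)).map (fun k => opt (t+1) (xs.take k)) := by
  have hpre : ∀ k, k < xs.length → g.getD k none = opt t (xs.take k) := by
    intro k hk
    rw [hg, PySem.List.getD_map_range _ _ k _ (by omega)]
  obtain ⟨s, hfold, -⟩ := binner xs g (fun k => opt t (xs.take k)) hpre xs.length (le_refl _)
  rw [hfold]
  show [none] ++ _ = _
  rw [List.range_succ_eq_map, List.map_cons, List.map_map]
  rw [show opt (t+1) (xs.take 0) = none from opt_short (t+1) _ (by simp)]
  rw [List.singleton_append]
  congr 1
  refine List.map_congr_left (fun c hc => ?_)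
  have hcn : c < xs.length := List.mem_range.mp hc
  rw [Function.comp_apply, opt_last t (xs.take (c+1)),
      show (xs.take (c+1)).length = c+1 from by simp; omega]
  refine ominR_congr (c+1) (fun k hk => ?_)
  rw [List.take_take, show min k (c+1) = k from by omega]

-- B's day loop, iterated
theorem bouter (xs : List Int) : ∀ (c t : Nat) (g : List (Option Int)),
    g = (List.range (xs.length+1)).map (fun k => opt t (xs.take k)) →
    ((PySem.List.pyRange ((t:Nat):Int) (((t+c:Nat)):Int) 1).foldl (fun g _day =>
      ((PySem.List.pyRange 0 ((xs.length:Int)) 1).foldl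
        (fun (st : List (Int × Option Int × Option Int) × List (Option Int)) i =>
          let x := xs.getD i.toNat 0
          let pm := popMerge st.1 x (g.getD i.toNat none)
          let best := omin (oadd pm.2 (some x)) (bestOf pm.1)
          ((x, pm.2, best) :: pm.1, st.2 ++ [best]))
        ([], [none])).2) g)
    = (List.range (xs.length+1)).map (fun k => opt (t+c) (xs.take k)) := by
  intro c
  induction c with
  | zero =>
    intro t g hg
    rw [PySem.List.pyRange_one_eq_nil (a := ((t:Nat):Int)) (b := (((t+0:Nat)):Int)) (by omega),
        List.foldl_nil]
    simpa using hg
  | succ c ih =>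
    intro t g hg
    rw [PySem.List.pyRange_one_cons (a := ((t:Nat):Int)) (b := ((t + (c+1) : Nat) : Int))
          (by push_cast; omega), List.foldl_cons]
    rw [blayer xs t g hg]
    rw [show ((t + (c+1) : Nat) : Int) = (((t+1)+c : Nat) : Int) from by push_cast; ring,
        show ((t:Nat):Int) + 1 = (((t+1):Nat):Int) from by push_cast; ring]
    rw [ih (t+1) _ rfl, show t+1+c = t+(c+1) from by omega]

theorem g0_eq (xs : List Int) (h1 : 1 ≤ xs.length) :
    (some 0 :: List.replicate xs.length (none : Option Int))
      = (List.range (xs.length+1)).map (fun k => opt 0 (xs.take k)) := by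
  rw [List.range_succ_eq_map, List.map_cons]
  congr 1
  rw [List.map_map]
  symm
  rw [List.eq_replicate_iff]
  refine ⟨by simp, fun b hb => ?_⟩
  obtain ⟨a, ha, rfl⟩ := List.mem_map.mp hb
  rw [Function.comp_apply, opt, if_neg (fun hnil => by
    rcases List.take_eq_nil_iff.mp hnil with h | h
    · omega
    · rw [h] at h1; simp at h1)]

theorem minDifficulty2_alt_eq_opt (xs : List Int) (d : Int) (hd : 0 ≤ d) :
    minDifficulty2_alt xs d = (match opt d.toNat xs with
                               | some z => z
                               | none => -1) := by
  obtain ⟨m, rfl⟩ : ∃ m : Nat, d = (m : Int) := ⟨d.toNat, by omega⟩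
  rw [Int.toNat_natCast]
  simp only [minDifficulty2_alt]
  by_cases hc : (m:Int) ≤ 0 ∨ (xs.length : Int) < (m:Int)
  · rw [if_pos hc]
    by_cases h00 : (m:Int) = 0 ∧ xs.length = 0
    · rw [if_pos h00]
      obtain ⟨h1, h2⟩ := h00
      obtain rfl : m = 0 := by omega
      obtain rfl : xs = [] := List.length_eq_zero_iff.mp h2
      rfl
    · rw [if_neg h00]
      have hnone : opt m xs = none := by
        rcases hc with hc | hc
        · obtain rfl : m = 0 := by omega
          have hne : xs ≠ [] := fun hnil => h00 ⟨rfl, by rw [hnil]; rfl⟩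
          rw [show opt 0 xs = if xs = [] then some 0 else none from rfl, if_neg hne]
        · exact opt_short m xs (by omega)
      rw [hnone]
  · rw [if_neg hc]
    have hn1 : 1 ≤ xs.length := by omega
    rw [g0_eq xs hn1,
        show (PySem.List.pyRange 0 ((m:Nat):Int) 1) = PySem.List.pyRange (((0:Nat)):Int) (((0+m : Nat)):Int) 1 from by norm_num,
        bouter xs m 0 _ rfl,
        PySem.List.getD_map_range _ _ xs.length _ (by omega), List.take_length, Nat.zero_add]

-- ===== VERDICT (by name: the statement is the Claim_ definition above) =====
theorem minDifficulty2_spec : Claim_equal_minDifficulty2 := by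
  intro xs d _ hpre
  unfold Spec_minDifficulty2
  rw [minDifficulty2_eq_opt xs d hpre, minDifficulty2_alt_eq_opt xs d hpre]
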